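-- pv_equiv track=rewrite | github.com/ReyhaneMohammadi2002/Kiducation-With-Aruco | jalaliDate.py | gregorian_to_jalali
-- ===== SOURCE A (Python) =====
-- def gregorian_to_jalali(g_y, g_m, g_d):
--     g_days_in_month = [31, 28, 31, 30, 31, 30, 31, 31, 30, 31, 30, 31]
--     j_days_in_month = [31, 31, 31, 31, 31, 31, 30, 30, 30, 30, 30, 29]
--
--     gy = g_y - 1600
--     gm = g_m - 1
--     gd = g_d - 1
--
--     g_day_no = 365 * gy + (gy + 3) // 4 - (gy + 99) // 100 + (gy + 399) // 400
--     for i in range(gm):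
--         g_day_no += g_days_in_month[i]
--     if gm > 1 and ((gy % 4 == 0 and gy % 100 != 0) or (gy % 400 == 0)):
--         # leap year adjustment
--         g_day_no += 1
--     g_day_no += gd
--
--     j_day_no = g_day_no - 79
--
--     j_np = j_day_no // 12053  # 12053 = 33 years
--     j_day_no = j_day_no % 12053
--
--     jy = 979 + 33 * j_np + 4 * (j_day_no // 1461)
--
--     j_day_no %= 1461
--
--     if j_day_no >= 366:
--         jy += (j_day_no - 366) // 365
--         j_day_no = (j_day_no - 366) % 365
--
--     for i in range(11):
--         if j_day_no < j_days_in_month[i]: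
--             jm = i + 1
--             jd = j_day_no + 1
--             break
--         j_day_no -= j_days_in_month[i]
--     else:
--         jm = 12
--         jd = j_day_no + 1
--
--     return jy, jm, jd
-- ===== SOURCE B (Python) =====
-- # B: same day-number preamble, but the Gregorian month loop becomes a cumulative-days
-- # table lookup and the Jalali month-search loop becomes closed-form block arithmetic.
-- GCUM = (0, 31, 59, 90, 120, 151, 181, 212, 243, 273, 304, 334, 365)
--
-- def gregorian_to_jalali(g_y, g_m, g_d):
--     gy = g_y - 1600
--     gm = g_m - 1
--     gd = g_d - 1
--
--     g_day_no = 365 * gy + (gy + 3) // 4 - (gy + 99) // 100 + (gy + 399) // 400 + gd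
--     if gm > 0:
--         g_day_no += GCUM[gm]
--         if gm > 1 and ((gy % 4 == 0 and gy % 100 != 0) or (gy % 400 == 0)):
--             g_day_no += 1
--
--     j_day_no = g_day_no - 79
--     jy = 979 + 33 * (j_day_no // 12053) + 4 * (j_day_no % 12053 // 1461)
--     j_day_no = j_day_no % 12053 % 1461
--     if j_day_no >= 366:
--         jy += (j_day_no - 366) // 365
--         j_day_no = (j_day_no - 366) % 365
--
--     if j_day_no < 186:
--         jm = 1 + j_day_no // 31
--         jd = 1 + j_day_no % 31
--     else:
--         rem = j_day_no - 186
--         if rem < 150: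
--             jm = 7 + rem // 30
--             jd = 1 + rem % 30
--         else:
--             jm = 12
--             jd = rem - 149
--     return jy, jm, jd
-- ===== Notes on version B (the rewrite author's own statement) =====
-- stated objective: simpler
-- what changed: The Gregorian month loop is replaced by a cumulative-days table lookup and the Jalali month-search loop by closed-form block arithmetic (j_day_no//31 for months 1-6, (j_day_no-186)//30 for 7-11, else month 12), removing both loops.
import Mathlib
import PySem

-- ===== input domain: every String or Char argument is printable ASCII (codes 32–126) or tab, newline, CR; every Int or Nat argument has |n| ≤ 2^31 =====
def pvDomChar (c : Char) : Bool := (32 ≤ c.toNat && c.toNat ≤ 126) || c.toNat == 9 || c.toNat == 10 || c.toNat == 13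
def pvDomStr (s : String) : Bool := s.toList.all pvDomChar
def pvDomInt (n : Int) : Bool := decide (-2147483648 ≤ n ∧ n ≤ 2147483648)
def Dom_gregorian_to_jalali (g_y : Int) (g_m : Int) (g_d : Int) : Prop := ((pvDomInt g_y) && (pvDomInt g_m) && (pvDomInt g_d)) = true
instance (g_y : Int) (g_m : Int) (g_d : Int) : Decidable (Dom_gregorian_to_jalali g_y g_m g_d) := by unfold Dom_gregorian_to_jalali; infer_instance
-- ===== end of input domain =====

-- B replaces A's two month loops by a cumulative-days table lookup and closed-form
-- block arithmetic (objective: simpler straight-line code, no loops).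

-- ===== PORT A =====
-- A's `for i in range(11): if j_day_no < j_days_in_month[i]: … break; j_day_no -= …; else: jm=12`
-- transliterated as structural recursion over the first 11 month lengths with the running index.
def jMonthLoop (months : List Int) (i : Int) (j : Int) : Int × Int :=
  match months with
  | [] => (12, j + 1)
  | d :: rest => if j < d then (i + 1, j + 1) else jMonthLoop rest (i + 1) (j - d)

def gregorian_to_jalali (g_y : Int) (g_m : Int) (g_d : Int) : Int × Int × Int :=
  let g_days_in_month : List Int := [31, 28, 31, 30, 31, 30, 31, 31, 30, 31, 30, 31]
  let j_days_in_month : List Int := [31, 31, 31, 31, 31, 31, 30, 30, 30, 30, 30, 29]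
  let gy := g_y - 1600
  let gm := g_m - 1
  let gd := g_d - 1
  let g_day_no := 365 * gy + PySem.Int.floordiv (gy + 3) 4 - PySem.Int.floordiv (gy + 99) 100
      + PySem.Int.floordiv (gy + 399) 400
  -- `for i in range(gm): g_day_no += g_days_in_month[i]` (IndexError for gm ≥ 13 is excluded by Pre_;
  -- pyGetD with default 0 stands for the raising lookup there)
  let g_day_no := (PySem.List.pyRange 0 gm 1).foldl
      (fun acc i => acc + PySem.List.pyGetD g_days_in_month i 0) g_day_no
  let g_day_no := if 1 < gm ∧ ((PySem.Int.mod gy 4 = 0 ∧ PySem.Int.mod gy 100 ≠ 0) ∨ PySem.Int.mod gy 400 = 0)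
      then g_day_no + 1 else g_day_no
  let g_day_no := g_day_no + gd
  let j_day_no := g_day_no - 79
  let j_np := PySem.Int.floordiv j_day_no 12053
  let j_day_no := PySem.Int.mod j_day_no 12053
  let jy := 979 + 33 * j_np + 4 * PySem.Int.floordiv j_day_no 1461
  let j_day_no := PySem.Int.mod j_day_no 1461
  let p := if 366 ≤ j_day_no
      then (jy + PySem.Int.floordiv (j_day_no - 366) 365, PySem.Int.mod (j_day_no - 366) 365)
      else (jy, j_day_no)
  let md := jMonthLoop (j_days_in_month.take 11) 0 p.2
  (p.1, md.1, md.2)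

-- ===== PORT B =====
def GCUM : List Int := [0, 31, 59, 90, 120, 151, 181, 212, 243, 273, 304, 334, 365]

def gregorian_to_jalali_alt (g_y : Int) (g_m : Int) (g_d : Int) : Int × Int × Int :=
  let gy := g_y - 1600
  let gm := g_m - 1
  let gd := g_d - 1
  let g_day_no := 365 * gy + PySem.Int.floordiv (gy + 3) 4 - PySem.Int.floordiv (gy + 99) 100
      + PySem.Int.floordiv (gy + 399) 400 + gd
  let g_day_no := if 0 < gm then
      (let g1 := g_day_no + PySem.List.pyGetD GCUM gm 0
       if 1 < gm ∧ ((PySem.Int.mod gy 4 = 0 ∧ PySem.Int.mod gy 100 ≠ 0) ∨ PySem.Int.mod gy 400 = 0)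
       then g1 + 1 else g1)
    else g_day_no
  let j_day_no := g_day_no - 79
  let jy := 979 + 33 * PySem.Int.floordiv j_day_no 12053
      + 4 * PySem.Int.floordiv (PySem.Int.mod j_day_no 12053) 1461
  let j := PySem.Int.mod (PySem.Int.mod j_day_no 12053) 1461
  let p := if 366 ≤ j
      then (jy + PySem.Int.floordiv (j - 366) 365, PySem.Int.mod (j - 366) 365)
      else (jy, j)
  if p.2 < 186 then
    (p.1, 1 + PySem.Int.floordiv p.2 31, 1 + PySem.Int.mod p.2 31)
  else
    let rem := p.2 - 186
    if rem < 150 then (p.1, 7 + PySem.Int.floordiv rem 30, 1 + PySem.Int.mod rem 30)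
    else (p.1, 12, rem - 149)

-- ===== PRECONDITION & SPEC =====
-- Pre_ excludes exactly g_m ≥ 14, where Python A raises IndexError on g_days_in_month[i].
def Pre_gregorian_to_jalali (g_y : Int) (g_m : Int) (g_d : Int) : Prop := g_m ≤ 13
instance (g_y : Int) (g_m : Int) (g_d : Int) : Decidable (Pre_gregorian_to_jalali g_y g_m g_d) := by
  unfold Pre_gregorian_to_jalali; infer_instance

def pvWitness_gregorian_to_jalali : Int × Int × Int := (2024, 3, 20)

def Spec_gregorian_to_jalali (g_y : Int) (g_m : Int) (g_d : Int) (out : Int × Int × Int) : Prop :=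
  out = gregorian_to_jalali_alt g_y g_m g_d
instance (g_y : Int) (g_m : Int) (g_d : Int) (out : Int × Int × Int) : Decidable (Spec_gregorian_to_jalali g_y g_m g_d out) := by
  unfold Spec_gregorian_to_jalali; infer_instance

-- ===== CLAIM (what is proved, stated in full; the proofs are below) =====
def Claim_equal_gregorian_to_jalali : Prop := ∀ (g_y : Int) (g_m : Int) (g_d : Int),
  Dom_gregorian_to_jalali g_y g_m g_d → Pre_gregorian_to_jalali g_y g_m g_d →
  Spec_gregorian_to_jalali g_y g_m g_d (gregorian_to_jalali g_y g_m g_d)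

-- ===== LEMMAS AND PROOFS =====

-- A's Gregorian month-sum loop equals B's cumulative-table lookup for gm ≤ 12.
theorem gsum_eq (gm : Int) (hgm : gm ≤ 12) (s : Int) :
    (PySem.List.pyRange 0 gm 1).foldl
      (fun acc i => acc + PySem.List.pyGetD ([31, 28, 31, 30, 31, 30, 31, 31, 30, 31, 30, 31] : List Int) i 0) s
    = s + (if 0 < gm then PySem.List.pyGetD GCUM gm 0 else 0) := by
  rw [PySem.List.foldl_add]
  by_cases h : gm ≤ 0
  · rw [PySem.List.pyRange_one_eq_nil h]
    simp [not_lt.mpr h]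
  · have h12 : gm = 1 ∨ gm = 2 ∨ gm = 3 ∨ gm = 4 ∨ gm = 5 ∨ gm = 6 ∨ gm = 7 ∨ gm = 8
        ∨ gm = 9 ∨ gm = 10 ∨ gm = 11 ∨ gm = 12 := by omega
    rcases h12 with h' | h' | h' | h' | h' | h' | h' | h' | h' | h' | h' | h' <;> subst h' <;> congr 1

-- A's Jalali month-search loop equals B's closed-form block arithmetic on [0, 365].
theorem jmonth_eq (j : Int) (h0 : 0 ≤ j) (h1 : j ≤ 365) :
    jMonthLoop ([31, 31, 31, 31, 31, 31, 30, 30, 30, 30, 30] : List Int) 0 j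
    = (if j < 186 then (1 + PySem.Int.floordiv j 31, 1 + PySem.Int.mod j 31)
       else if j - 186 < 150 then (7 + PySem.Int.floordiv (j - 186) 30, 1 + PySem.Int.mod (j - 186) 30)
       else (12, j - 186 - 149)) := by
  interval_cases j <;> decide

theorem gregorian_to_jalali_spec : Claim_equal_gregorian_to_jalali := by
  intro g_y g_m g_d _hdom hpre
  unfold Spec_gregorian_to_jalali gregorian_to_jalali gregorian_to_jalali_alt
  simp only []
  have hm13 : g_m ≤ 13 := hpre
  rw [gsum_eq (g_m - 1) (by omega) _]
  -- make both sides share the same g_day_no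
  have hg : (if 1 < g_m - 1 ∧ ((PySem.Int.mod (g_y - 1600) 4 = 0 ∧ PySem.Int.mod (g_y - 1600) 100 ≠ 0) ∨ PySem.Int.mod (g_y - 1600) 400 = 0)
        then (365 * (g_y - 1600) + PySem.Int.floordiv (g_y - 1600 + 3) 4 - PySem.Int.floordiv (g_y - 1600 + 99) 100
          + PySem.Int.floordiv (g_y - 1600 + 399) 400 + (if 0 < g_m - 1 then PySem.List.pyGetD GCUM (g_m - 1) 0 else 0)) + 1
        else 365 * (g_y - 1600) + PySem.Int.floordiv (g_y - 1600 + 3) 4 - PySem.Int.floordiv (g_y - 1600 + 99) 100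
          + PySem.Int.floordiv (g_y - 1600 + 399) 400 + (if 0 < g_m - 1 then PySem.List.pyGetD GCUM (g_m - 1) 0 else 0)) + (g_d - 1)
      = (if 0 < g_m - 1 then
          (let g1 := 365 * (g_y - 1600) + PySem.Int.floordiv (g_y - 1600 + 3) 4 - PySem.Int.floordiv (g_y - 1600 + 99) 100
            + PySem.Int.floordiv (g_y - 1600 + 399) 400 + (g_d - 1) + PySem.List.pyGetD GCUM (g_m - 1) 0
          if 1 < g_m - 1 ∧ ((PySem.Int.mod (g_y - 1600) 4 = 0 ∧ PySem.Int.mod (g_y - 1600) 100 ≠ 0) ∨ PySem.Int.mod (g_y - 1600) 400 = 0)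
          then g1 + 1 else g1)
        else 365 * (g_y - 1600) + PySem.Int.floordiv (g_y - 1600 + 3) 4 - PySem.Int.floordiv (g_y - 1600 + 99) 100
          + PySem.Int.floordiv (g_y - 1600 + 399) 400 + (g_d - 1)) := by
    split_ifs <;> first | omega | ring
  rw [hg]
  -- from here both sides compute from the same day number; abbreviate it
  generalize (if 0 < g_m - 1 then _ else _ : Int) = G
  -- bound the day index entering the month computation
  have h1461 : (0:Int) < 1461 := by omega
  have h12053 : (0:Int) < 12053 := by omega
  set m2 := PySem.Int.mod (PySem.Int.mod (G - 79) 12053) 1461 with hm2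
  have hm2lo : 0 ≤ m2 := PySem.Int.mod_nonneg _ h1461
  have hm2hi : m2 < 1461 := PySem.Int.mod_lt _ h1461
  have htake : List.take 11 ([31, 31, 31, 31, 31, 31, 30, 30, 30, 30, 30, 29] : List Int)
      = [31, 31, 31, 31, 31, 31, 30, 30, 30, 30, 30] := rfl
  rw [htake]
  by_cases hc : 366 ≤ m2
  · simp only [if_pos hc]
    have hb : PySem.Int.mod (m2 - 366) 365 < 365 := PySem.Int.mod_lt _ (by omega)
    rw [jmonth_eq _ (PySem.Int.mod_nonneg _ (by omega)) (by omega)]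
    split_ifs <;> rfl
  · simp only [if_neg hc]
    rw [jmonth_eq _ hm2lo (by omega)]
    split_ifs <;> rfl
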